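-- pv_equiv track=rewrite | github.com/steven-solar/HomopolyMapper | lift_seqs.py | lift_u_to_c_from_smaller_idx
-- ===== SOURCE A (Python) =====
-- def lift_u_to_c_from_smaller_idx(uncompressed_coord, curr_uncompressed_coord, uncompressed_seq, map, rle, is_end):
--     '''A helper function for lifting a coordinate from uncompressed to compressed space in the case when the nearest map key pertains to a smaller uncompressed index than the one being lifted
--
--     Args:
--         uncompressed_coord (int): The uncompressed coordinate being lifted
--         curr_uncompressed_coord (int): The nearest uncompressed coordinate present in the map
--         uncompressed_seq (str): The uncompressed sequence being lifted
--         map (dict): A dictionary mapping uncompresed indices to their corresponding compressed indices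
--         rle (list): A run length encoding of the uncompressed sequence
--         is_end (bool): True if this corresponds to the end index of the sequence being lifted
--
--     Returns:
--         curr_compressed_coord (int): The corresponding coordinate in compressed space
--     '''
--     curr_compressed_coord = map[curr_uncompressed_coord]
--     if uncompressed_seq[uncompressed_coord] == uncompressed_seq[curr_uncompressed_coord]:
--         if is_end:
--             return curr_compressed_coord + 1
--         else:
--             return curr_compressed_coord
--     while curr_uncompressed_coord < uncompressed_coord:
--         curr_uncompressed_coord += rle[curr_compressed_coord]
--         curr_compressed_coord += 1
--     if curr_uncompressed_coord > uncompressed_coord and rle[curr_compressed_coord] > 1 and uncompressed_seq[curr_uncompressed_coord] != uncompressed_seq[uncompressed_coord]: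
--         curr_compressed_coord -= 1
--     if is_end:
--         return curr_compressed_coord + 1
--     else:
--         return curr_compressed_coord
-- ===== SOURCE B (Python) =====
-- from bisect import bisect_left
-- from itertools import accumulate
--
--
-- def lift_u_to_c_from_smaller_idx(uncompressed_coord, curr_uncompressed_coord, uncompressed_seq, map, rle, is_end):
--     curr_compressed_coord = map[curr_uncompressed_coord]
--     if uncompressed_seq[uncompressed_coord] == uncompressed_seq[curr_uncompressed_coord]:
--         return curr_compressed_coord + 1 if is_end else curr_compressed_coord
--     if curr_uncompressed_coord < uncompressed_coord:
--         # prefix[i] = curr_uncompressed_coord + sum of the first i remaining runs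
--         prefix = list(accumulate(rle[curr_compressed_coord:], initial=curr_uncompressed_coord))
--         k = bisect_left(prefix, uncompressed_coord)
--         curr_uncompressed_coord = prefix[k]
--         curr_compressed_coord += k
--     if (curr_uncompressed_coord > uncompressed_coord and rle[curr_compressed_coord] > 1
--             and uncompressed_seq[curr_uncompressed_coord] != uncompressed_seq[uncompressed_coord]):
--         curr_compressed_coord -= 1
--     return curr_compressed_coord + 1 if is_end else curr_compressed_coord
-- ===== Notes on version B (the rewrite author's own statement) =====
-- stated objective: alternative
-- what changed: Replaces the incremental run-by-run while-loop with a prefix-sum table of the remaining run lengths (itertools.accumulate) plus a bisect_left binary search that lands on the same stopping index in one step; the map lookup, the top char-equality guard and the overshoot/is_end correction are unchanged.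
-- outside the precondition, e.g. on lift_u_to_c_from_smaller_idx(3, 1, 'abaab', {1: -1}, [3, 1], False): A returns 1, B raises IndexError; on lift_u_to_c_from_smaller_idx(1, 0, 'ba', {0: 0}, [1, -1, -1, 0], False): A returns 1, B raises IndexError
import Mathlib
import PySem

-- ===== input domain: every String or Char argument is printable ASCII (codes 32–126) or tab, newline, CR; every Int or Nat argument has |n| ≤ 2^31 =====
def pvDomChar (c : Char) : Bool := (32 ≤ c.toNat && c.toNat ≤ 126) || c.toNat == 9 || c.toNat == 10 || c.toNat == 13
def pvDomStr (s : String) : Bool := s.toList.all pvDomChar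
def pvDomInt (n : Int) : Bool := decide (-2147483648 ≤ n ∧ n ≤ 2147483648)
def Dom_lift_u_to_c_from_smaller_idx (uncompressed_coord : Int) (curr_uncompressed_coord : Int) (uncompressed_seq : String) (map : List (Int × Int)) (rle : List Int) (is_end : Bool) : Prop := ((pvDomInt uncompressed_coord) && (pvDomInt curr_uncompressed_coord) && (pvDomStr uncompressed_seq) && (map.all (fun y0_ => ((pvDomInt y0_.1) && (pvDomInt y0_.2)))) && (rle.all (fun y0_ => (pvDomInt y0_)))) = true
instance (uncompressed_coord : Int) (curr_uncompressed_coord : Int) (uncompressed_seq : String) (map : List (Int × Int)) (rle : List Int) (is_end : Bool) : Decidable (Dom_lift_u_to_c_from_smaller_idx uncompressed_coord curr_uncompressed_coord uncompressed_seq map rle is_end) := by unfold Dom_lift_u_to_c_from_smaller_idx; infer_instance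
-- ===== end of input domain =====

-- B replaces A's run-by-run while-loop with a pfx-sum table of the remaining runs plus a
-- bisect_left search (same cost class, different decomposition); lookup, char guard and the
-- overshoot/is_end correction are unchanged.

-- ===== PORT A =====

-- the final overshoot-correction + is_end return, as A writes it
def pvFinishA (u : Int) (au : Char) (seq : String) (rle : List Int) (cu cc : Int) (is_end : Bool) : Int :=
  let cc' :=
    if u < cu then
      match PySem.List.pyGet? rle cc with
      | none => cc          -- Python raises IndexError here (outside Pre_)
      | some r =>
        if 1 < r then
          match PySem.Str.pyGet? seq cu with
          | none => cc      -- Python raises IndexError here (outside Pre_)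
          | some c => if c ≠ au then cc - 1 else cc
        else cc
    else cc
  if is_end then cc' + 1 else cc'

-- A's while-loop: while cu < u: cu += rle[cc]; cc += 1  (none = IndexError)
def pvALoop (u cu cc : Int) (rle : List Int) : Option (Int × Int) :=
  if cu < u then
    match h : PySem.List.pyGet? rle cc with
    | none => none
    | some r => pvALoop u (cu + r) (cc + 1) rle
  else some (cu, cc)
termination_by (rle.length - cc).toNat
decreasing_by
  have hin : PySem.Raise.InRange rle.length cc := by
    by_contra hc
    rw [← PySem.List.pyGet?_eq_none_iff] at hc
    simp [hc] at h
  simp only [PySem.Raise.InRange] at hin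
  omega

def lift_u_to_c_from_smaller_idx (uncompressed_coord : Int) (curr_uncompressed_coord : Int) (uncompressed_seq : String) (map : List (Int × Int)) (rle : List Int) (is_end : Bool) : Int :=
  match PySem.Dict.get? (PySem.Dict.ofList map) curr_uncompressed_coord with
  | none => 0               -- Python raises KeyError (outside Pre_)
  | some cc =>
    match PySem.Str.pyGet? uncompressed_seq uncompressed_coord,
          PySem.Str.pyGet? uncompressed_seq curr_uncompressed_coord with
    | some au, some ac =>
      if au = ac then (if is_end then cc + 1 else cc)
      else
        match pvALoop uncompressed_coord curr_uncompressed_coord cc rle with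
        | none => 0         -- Python raises IndexError (outside Pre_)
        | some (cuf, ccf) => pvFinishA uncompressed_coord au uncompressed_seq rle cuf ccf is_end
    | _, _ => 0             -- Python raises IndexError (outside Pre_)

-- ===== PORT B =====

-- the final overshoot-correction + is_end return, as B writes it (same code as in A)
def pvFinishB (u : Int) (au : Char) (seq : String) (rle : List Int) (cu cc : Int) (is_end : Bool) : Int :=
  let cc' :=
    if u < cu then
      match PySem.List.pyGet? rle cc with
      | some r =>
        if 1 < r then
          match PySem.Str.pyGet? seq cu with
          | some c => if c = au then cc else cc - 1
          | none => cc      -- Python raises IndexError here (outside Pre_)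
        else cc
      | none => cc          -- Python raises IndexError here (outside Pre_)
    else cc
  if is_end then cc' + 1 else cc'


-- port of bisect.bisect_left, exact on the sorted lists Pre_ guarantees
def pvBisectLeft (l : List Int) (x : Int) : Nat := (l.takeWhile (fun p => decide (p < x))).length

-- port of list(accumulate(runs, initial=cu))
def pvPrefix (cu : Int) (runs : List Int) : List Int := runs.scanl (· + ·) cu

def lift_u_to_c_from_smaller_idx_alt (uncompressed_coord : Int) (curr_uncompressed_coord : Int) (uncompressed_seq : String) (map : List (Int × Int)) (rle : List Int) (is_end : Bool) : Int :=
  match PySem.Dict.get? (PySem.Dict.ofList map) curr_uncompressed_coord,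
        PySem.Str.pyGet? uncompressed_seq uncompressed_coord,
        PySem.Str.pyGet? uncompressed_seq curr_uncompressed_coord with
  | some cc, some au, some ac =>
      if au = ac then (if is_end then cc + 1 else cc)
      else
        let s :=
          if curr_uncompressed_coord < uncompressed_coord then
            let pfx := pvPrefix curr_uncompressed_coord (PySem.List.slice rle (some cc) none)
            let k := pvBisectLeft pfx uncompressed_coord
            match PySem.List.pyGet? pfx (k : Int) with
            | some v => some (v, cc + (k : Int))
            | none => none  -- Python raises IndexError at pfx[k] (outside Pre_)
          else some (curr_uncompressed_coord, cc)
        match s with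
        | some (cuf, ccf) => pvFinishB uncompressed_coord au uncompressed_seq rle cuf ccf is_end
        | none => 0
  | none, _, _ => 0         -- Python raises KeyError (outside Pre_)
  | some _, none, _ => 0    -- Python raises IndexError (outside Pre_)
  | some _, some _, none => 0 -- Python raises IndexError (outside Pre_)

-- ===== PRECONDITION & SPEC =====
-- Pre_ excludes exactly the inputs where A raises (missing map key, string/rle index out of range,
-- which includes a run-length total too short to reach the target), and additionally — only in the
-- walking branch — negative compressed start indices and non-positive run lengths, where A's value
-- rests on Python's negative-index wraparound / a non-monotone pfx walk (artefacts of its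
-- incremental scan) and B's slice-plus-bisect walk raises instead.
def Pre_lift_u_to_c_from_smaller_idx (uncompressed_coord : Int) (curr_uncompressed_coord : Int) (uncompressed_seq : String) (map : List (Int × Int)) (rle : List Int) (is_end : Bool) : Prop :=
  (PySem.Dict.get? (PySem.Dict.ofList map) curr_uncompressed_coord).isSome = true ∧
  PySem.Raise.InRange uncompressed_seq.toList.length uncompressed_coord ∧
  PySem.Raise.InRange uncompressed_seq.toList.length curr_uncompressed_coord ∧
  (PySem.Str.pyGet? uncompressed_seq uncompressed_coord
     = PySem.Str.pyGet? uncompressed_seq curr_uncompressed_coord ∨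
   (let cc := (PySem.Dict.get? (PySem.Dict.ofList map) curr_uncompressed_coord).getD 0
    (curr_uncompressed_coord < uncompressed_coord →
      (0 ≤ cc ∧ (∀ r ∈ rle.drop cc.toNat, 1 ≤ r) ∧
       uncompressed_coord ≤ curr_uncompressed_coord + (rle.drop cc.toNat).sum ∧
       (let pfx := (rle.drop cc.toNat).scanl (· + ·) curr_uncompressed_coord
        let k := (pfx.takeWhile (fun p => decide (p < uncompressed_coord))).length
        let cuf := pfx.getD k 0
        uncompressed_coord < cuf →
          (cc + (k : Int) < (rle.length : Int) ∧
           (1 < rle.getD (cc.toNat + k) 0 →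
             PySem.Raise.InRange uncompressed_seq.toList.length cuf))))) ∧
    (uncompressed_coord < curr_uncompressed_coord → PySem.Raise.InRange rle.length cc)))
instance (uncompressed_coord : Int) (curr_uncompressed_coord : Int) (uncompressed_seq : String) (map : List (Int × Int)) (rle : List Int) (is_end : Bool) : Decidable (Pre_lift_u_to_c_from_smaller_idx uncompressed_coord curr_uncompressed_coord uncompressed_seq map rle is_end) := by unfold Pre_lift_u_to_c_from_smaller_idx; infer_instance

def pvWitness_lift_u_to_c_from_smaller_idx : Int × Int × String × (List (Int × Int)) × List Int × Bool := (2, 0, "aab", [(0, 0)], [2, 1], false)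

def Spec_lift_u_to_c_from_smaller_idx (uncompressed_coord : Int) (curr_uncompressed_coord : Int) (uncompressed_seq : String) (map : List (Int × Int)) (rle : List Int) (is_end : Bool) (out : Int) : Prop := out = lift_u_to_c_from_smaller_idx_alt uncompressed_coord curr_uncompressed_coord uncompressed_seq map rle is_end
instance (uncompressed_coord : Int) (curr_uncompressed_coord : Int) (uncompressed_seq : String) (map : List (Int × Int)) (rle : List Int) (is_end : Bool) (out : Int) : Decidable (Spec_lift_u_to_c_from_smaller_idx uncompressed_coord curr_uncompressed_coord uncompressed_seq map rle is_end out) := by unfold Spec_lift_u_to_c_from_smaller_idx; infer_instance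

-- ===== CLAIM (what is proved, stated in full; the proofs are below) =====
def Claim_equal_lift_u_to_c_from_smaller_idx : Prop := ∀ (uncompressed_coord : Int) (curr_uncompressed_coord : Int) (uncompressed_seq : String) (map : List (Int × Int)) (rle : List Int) (is_end : Bool), Dom_lift_u_to_c_from_smaller_idx uncompressed_coord curr_uncompressed_coord uncompressed_seq map rle is_end → Pre_lift_u_to_c_from_smaller_idx uncompressed_coord curr_uncompressed_coord uncompressed_seq map rle is_end → Spec_lift_u_to_c_from_smaller_idx uncompressed_coord curr_uncompressed_coord uncompressed_seq map rle is_end (lift_u_to_c_from_smaller_idx uncompressed_coord curr_uncompressed_coord uncompressed_seq map rle is_end)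

-- ===== LEMMAS AND PROOFS =====

-- the two copies of the shared correction code agree
theorem pvFinish_eq (u : Int) (au : Char) (seq : String) (rle : List Int) (cu cc : Int) (is_end : Bool) :
    pvFinishA u au seq rle cu cc is_end = pvFinishB u au seq rle cu cc is_end := by
  unfold pvFinishA pvFinishB
  by_cases h : u < cu
  · simp only [if_pos h]
    cases PySem.List.pyGet? rle cc with
    | none => rfl
    | some r =>
      by_cases hr : 1 < r
      · simp only [if_pos hr]
        cases PySem.Str.pyGet? seq cu with
        | none => rfl
        | some c => by_cases hc : c = au <;> simp [hc]
      · simp [hr]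
  · simp [h]

-- A's loop, run from a non-negative index cc whose remaining runs can reach u, lands exactly on
-- the bisect point of the pfx-sum table (and the stopping count k stays inside the table).
theorem pvALoop_eq_prefix (runs : List Int) (u : Int) : ∀ (cu cc : Int) (rle : List Int),
    0 ≤ cc → rle.drop cc.toNat = runs → (cu < u → u ≤ cu + runs.sum) →
    (((runs.scanl (· + ·) cu).takeWhile (fun p => decide (p < u))).length ≤ runs.length ∧
     pvALoop u cu cc rle =
       some ((runs.scanl (· + ·) cu).getD
               (((runs.scanl (· + ·) cu).takeWhile (fun p => decide (p < u))).length) 0,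
             cc + ((((runs.scanl (· + ·) cu).takeWhile (fun p => decide (p < u))).length : Int)))) := by
  induction runs with
  | nil =>
    intro cu cc rle hcc hdrop hreach
    have hcu : ¬ cu < u := by
      intro h; have := hreach h; simp at this; omega
    refine ⟨by simp [List.scanl_nil, hcu], ?_⟩
    rw [pvALoop]
    simp [hcu, List.scanl_nil]
  | cons r rs ih =>
    intro cu cc rle hcc hdrop hreach
    by_cases hcu : cu < u
    · -- one loop step
      have hget : PySem.List.pyGet? rle cc = some r := by
        rw [PySem.List.pyGet?_of_nonneg rle hcc]
        rw [← List.head?_drop, hdrop]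
        rfl
      have hdrop' : rle.drop (cc + 1).toNat = rs := by
        have h1 : (cc + 1).toNat = cc.toNat + 1 := by omega
        rw [h1, ← List.drop_drop, hdrop]
        rfl
      have hreach' : cu + r < u → u ≤ cu + r + rs.sum := by
        intro _; have := hreach hcu; simp at this; omega
      obtain ⟨ihk, ihv⟩ := ih (cu + r) (cc + 1) rle (by omega) hdrop' hreach'
      have hstep : pvALoop u cu cc rle = pvALoop u (cu + r) (cc + 1) rle := by
        rw [pvALoop]
        simp only [if_pos hcu]
        split
        · next h => rw [hget] at h; cases h
        · next r' h => rw [hget] at h; cases h; rfl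
      constructor
      · simp only [List.scanl_cons, List.takeWhile_cons, hcu, decide_true, if_true,
          List.length_cons]
        omega
      · rw [hstep, ihv]
        simp only [List.scanl_cons, List.takeWhile_cons, hcu, decide_true, if_true,
          List.length_cons, List.getD_cons_succ]
        congr 2
        push_cast; ring
    · refine ⟨by simp [List.scanl_cons, hcu], ?_⟩
      rw [pvALoop]
      simp [hcu, List.scanl_cons]

-- ===== VERDICT (by name: the statement is the Claim_ definition above) =====
theorem lift_u_to_c_from_smaller_idx_spec : Claim_equal_lift_u_to_c_from_smaller_idx := by
  intro u cu seq map rle is_end _hdom hpre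
  unfold Spec_lift_u_to_c_from_smaller_idx
  obtain ⟨hsome, hu, hcu, hrest⟩ := hpre
  rcases hget : PySem.Dict.get? (PySem.Dict.ofList map) cu with _ | cc
  · rw [hget] at hsome; simp at hsome
  rcases hau : PySem.Str.pyGet? seq u with _ | au
  · exfalso
    rw [PySem.Str.pyGet?_eq, PySem.Chars.pyGet?_eq_listPyGet?, PySem.List.pyGet?_eq_none_iff] at hau
    exact hau hu
  rcases hac : PySem.Str.pyGet? seq cu with _ | ac
  · exfalso
    rw [PySem.Str.pyGet?_eq, PySem.Chars.pyGet?_eq_listPyGet?, PySem.List.pyGet?_eq_none_iff] at hac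
    exact hac hcu
  unfold lift_u_to_c_from_smaller_idx lift_u_to_c_from_smaller_idx_alt
  rw [hget, hau, hac]
  by_cases heq : au = ac
  · simp [heq]
  · simp only [if_neg heq]
    rcases hrest with hchars | hwalk
    · exfalso; rw [hau, hac] at hchars; exact heq (by injection hchars)
    rw [hget] at hwalk
    simp only [Option.getD_some] at hwalk
    obtain ⟨hforward, _hback⟩ := hwalk
    by_cases hlt : cu < u
    · -- B takes the pfx/bisect path; k stays strictly inside the table
      obtain ⟨hcc0, _hpos, hreach, _hfin⟩ := hforward hlt
      obtain ⟨hk, hloop⟩ :=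
        pvALoop_eq_prefix (rle.drop cc.toNat) u cu cc rle hcc0 rfl (fun _ => hreach)
      rw [hloop]
      have hslice : PySem.List.slice rle (some cc) none = rle.drop cc.toNat :=
        PySem.List.slice_from rle hcc0
      simp only [hslice, pvPrefix, pvBisectLeft]
      set runs := rle.drop cc.toNat with hruns
      set pfx := runs.scanl (· + ·) cu with hpfx
      set k := (pfx.takeWhile (fun p => decide (p < u))).length with hkdef
      have hlen : pfx.length = runs.length + 1 := by
        rw [hpfx, List.length_scanl]
      have hklt : k < pfx.length := by omega
      have hgetk : PySem.List.pyGet? pfx (k : Int) = some (pfx.getD k 0) := by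
        rw [PySem.List.pyGet?_natCast]
        rw [List.getElem?_eq_getElem hklt, List.getD_eq_getElem pfx 0 hklt]
      simp only [if_pos hlt, hgetk]
      apply pvFinish_eq
    · -- the loop does not run in A, and B skips the bisect path
      rw [pvALoop]
      simp only [if_neg hlt]
      apply pvFinish_eq
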